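-- pv_equiv track=rewrite | github.com/ywen19/sign_avatar_js | vocab_preprocess/lowercase_duplicants_json.py | lowercase_duplicate_groups
-- ===== SOURCE A (Python) =====
-- def lowercase_duplicate_groups(duplicate_groups):
--     merged = {}
--     collisions = {}
--
--     for key, values in duplicate_groups.items():
--         lower_key = key.lower()
--         lower_values = [value.lower() for value in values]
--
--         if lower_key not in merged:
--             merged[lower_key] = []
--         else:
--             collisions.setdefault(lower_key, []).append(key)
--
--         for value in lower_values:
--             if value not in merged[lower_key]:
--                 merged[lower_key].append(value)
--
--     return merged, collisions
-- ===== SOURCE B (Python) =====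
-- def lowercase_duplicate_groups(duplicate_groups):
--     # Pass 1: group the value-lists by lowercased key, in first-encounter order.
--     index = {}
--     for key, values in duplicate_groups.items():
--         index.setdefault(key.lower(), []).append(values)
--
--     # Pass 2: one merged entry per group, deduping lowercased values in order.
--     merged = {}
--     for lower_key, groups in index.items():
--         out = []
--         for values in groups:
--             for value in values:
--                 lower_value = value.lower()
--                 if lower_value not in out:
--                     out.append(lower_value)
--         merged[lower_key] = out
--
--     # Pass 3: collisions = every key whose lowercased form was already seen.
--     collisions = {}
--     seen = set()
--     for key in duplicate_groups:
--         lower_key = key.lower()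
--         if lower_key in seen:
--             collisions.setdefault(lower_key, []).append(key)
--         else:
--             seen.add(lower_key)
--
--     return merged, collisions
-- ===== Notes on version B (the rewrite author's own statement) =====
-- stated objective: alternative
-- what changed: Replaces A's single interleaved loop that mutates both dicts per entry with three independent passes: group value-lists by lowercased key, then build each merged entry from its whole group at once, then compute collisions with a seen-set scan.
import Mathlib
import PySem

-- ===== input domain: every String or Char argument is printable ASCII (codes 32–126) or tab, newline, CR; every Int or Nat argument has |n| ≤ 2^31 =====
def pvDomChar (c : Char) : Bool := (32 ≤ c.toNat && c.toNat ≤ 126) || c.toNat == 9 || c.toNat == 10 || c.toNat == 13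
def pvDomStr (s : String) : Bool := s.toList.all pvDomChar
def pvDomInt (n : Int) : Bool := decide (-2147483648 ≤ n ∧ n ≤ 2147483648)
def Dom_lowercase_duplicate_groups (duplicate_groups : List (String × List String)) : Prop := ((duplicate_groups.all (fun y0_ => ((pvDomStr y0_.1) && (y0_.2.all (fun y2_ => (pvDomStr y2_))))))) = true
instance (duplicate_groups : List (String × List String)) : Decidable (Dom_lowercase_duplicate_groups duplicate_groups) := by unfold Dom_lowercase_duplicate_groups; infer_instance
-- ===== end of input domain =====

-- B replaces A's single interleaved loop by three independent passes (group by lowered key,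
-- then merge each group at once, then a seen-set collision scan); objective: alternative decomposition.

-- ===== PORT A =====
-- inner loop 'for value in lower_values: if value not in merged[lower_key]: merged[lower_key].append(value)'
def aValStep (lower_key : String) (m : PySem.Dict String (List String)) (value : String) :
    PySem.Dict String (List String) :=
  if (m.getD lower_key []).contains value then m else m.modify lower_key [] (· ++ [value])

-- one iteration of A's 'for key, values in duplicate_groups.items()' loop body
def aStep (st : PySem.Dict String (List String) × PySem.Dict String (List String))
    (kv : String × List String) :
    PySem.Dict String (List String) × PySem.Dict String (List String) :=
  let lower_key := PySem.Str.lower kv.1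
  let lower_values := kv.2.map PySem.Str.lower
  let st2 :=
    if st.1.contains lower_key = false then (st.1.insert lower_key [], st.2)
    -- collisions.setdefault(lower_key, []).append(key) = modify with default []
    else (st.1, st.2.modify lower_key [] (· ++ [kv.1]))
  (lower_values.foldl (aValStep lower_key) st2.1, st2.2)

def lowercase_duplicate_groups (duplicate_groups : List (String × List String)) :
    (List (String × List String)) × (List (String × List String)) :=
  let st := duplicate_groups.foldl aStep (PySem.Dict.empty, PySem.Dict.empty)
  (st.1.items, st.2.items)

-- ===== PORT B =====
-- 'if value.lower() not in out: out.append(value.lower())'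
def bDedupStep (out : List String) (value : String) : List String :=
  let lower_value := PySem.Str.lower value
  if out.contains lower_value then out else out ++ [lower_value]

-- 'for value in values: …'
def bDedupValues (out : List String) (values : List String) : List String :=
  values.foldl bDedupStep out

-- 'out = []; for values in groups: …'
def bGroupDedup (groups : List (List String)) : List String :=
  groups.foldl bDedupValues []

-- pass 1 body: index.setdefault(key.lower(), []).append(values)
def bIxStep (d : PySem.Dict String (List (List String))) (kv : String × List String) :
    PySem.Dict String (List (List String)) :=
  d.modify (PySem.Str.lower kv.1) [] (· ++ [kv.2])

-- pass 3 body: the seen-set collision scan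
def bColStep (st : PySem.Dict String (List String) × PySem.Set String)
    (kv : String × List String) :
    PySem.Dict String (List String) × PySem.Set String :=
  let lower_key := PySem.Str.lower kv.1
  if st.2.contains lower_key then (st.1.modify lower_key [] (· ++ [kv.1]), st.2)
  else (st.1, st.2.add lower_key)

def lowercase_duplicate_groups_alt (duplicate_groups : List (String × List String)) :
    (List (String × List String)) × (List (String × List String)) :=
  let index := duplicate_groups.foldl bIxStep PySem.Dict.empty
  let merged := index.items.foldl
    (fun (m : PySem.Dict String (List String)) p => m.insert p.1 (bGroupDedup p.2))
    PySem.Dict.empty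
  let cols := (duplicate_groups.foldl bColStep (PySem.Dict.empty, PySem.Set.empty)).1
  (merged.items, cols.items)

-- ===== PRECONDITION & SPEC =====
def Spec_lowercase_duplicate_groups (duplicate_groups : List (String × List String)) (out : (List (String × List String)) × (List (String × List String))) : Prop := out = lowercase_duplicate_groups_alt duplicate_groups
instance (duplicate_groups : List (String × List String)) (out : (List (String × List String)) × (List (String × List String))) : Decidable (Spec_lowercase_duplicate_groups duplicate_groups out) := by unfold Spec_lowercase_duplicate_groups; infer_instance

-- ===== CLAIM (what is proved, stated in full; the proofs are below) =====
def Claim_equal_lowercase_duplicate_groups : Prop := ∀ (duplicate_groups : List (String × List String)), Dom_lowercase_duplicate_groups duplicate_groups → Spec_lowercase_duplicate_groups duplicate_groups (lowercase_duplicate_groups duplicate_groups)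

-- ===== LEMMAS AND PROOFS =====

-- A's merged dict, reconstructed from B's index: one entry per group, merged at once
def mkMap (ix : PySem.Dict String (List (List String))) : PySem.Dict String (List String) :=
  PySem.Dict.mk (ix.items.map (fun p => (p.1, bGroupDedup p.2)))

theorem contains_mkMap (ix : PySem.Dict String (List (List String))) (k : String) :
    (mkMap ix).contains k = ix.contains k := by
  simp [mkMap, PySem.Dict.contains, List.any_map, Function.comp_def]

theorem keys_mkMap (ix : PySem.Dict String (List (List String))) :
    (mkMap ix).keys = ix.keys := by
  simp [mkMap, PySem.Dict.keys, List.map_map, Function.comp_def]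

theorem get?_mkMap (ix : PySem.Dict String (List (List String))) (k : String) :
    (mkMap ix).get? k = (ix.get? k).map bGroupDedup := by
  obtain ⟨l⟩ := ix
  induction l with
  | nil => rfl
  | cons hd tl ih =>
    obtain ⟨k1, g1⟩ := hd
    show (PySem.Dict.mk ((k1, bGroupDedup g1) :: (mkMap (PySem.Dict.mk tl)).items)).get? k
        = ((PySem.Dict.mk ((k1, g1) :: tl)).get? k).map bGroupDedup
    rw [PySem.Dict.get?_mk_cons, PySem.Dict.get?_mk_cons]
    by_cases h : (k1 == k) = true
    · rw [if_pos h, if_pos h]; rfl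
    · rw [if_neg h, if_neg h]; exact ih

theorem getD_mkMap_of_contains (ix : PySem.Dict String (List (List String))) (k : String)
    (h : ix.contains k = true) :
    (mkMap ix).getD k [] = bGroupDedup (ix.getD k []) := by
  rw [PySem.Dict.contains_eq_isSome_get?] at h
  obtain ⟨v, hv⟩ := Option.isSome_iff_exists.mp h
  rw [PySem.Dict.getD_eq_get?_getD, PySem.Dict.getD_eq_get?_getD, get?_mkMap, hv]
  rfl

-- replacing (the unique) entry of key k by its own value is the identity
theorem map_replace_self :
    ∀ (l : List (String × List String)) (k : String) (v : List String),
      (PySem.Dict.mk l).get? k = some v → (l.map (·.1)).Nodup →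
      l.map (fun p => if (p.1 == k) = true then (k, v) else p) = l := by
  intro l
  induction l with
  | nil => intro k v h _; exact absurd h (by simp [PySem.Dict.get?])
  | cons hd tl ih =>
    intro k v h hnd
    obtain ⟨k1, v1⟩ := hd
    simp only [List.map_cons, List.nodup_cons] at hnd
    rw [PySem.Dict.get?_mk_cons] at h
    by_cases hk : (k1 == k) = true
    · have hk' : k1 = k := by simpa using hk
      rw [if_pos hk] at h
      injection h with hv
      subst hv
      simp only [List.map_cons, if_pos hk]
      congr 1
      · rw [hk']
      · have htl : List.map (fun p => if (p.1 == k) = true then (k, v1) else p) tl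
            = List.map id tl := by
          apply List.map_congr_left
          intro p hp
          have hpf : (p.1 == k) = false := by
            rw [← hk']
            simp only [beq_eq_false_iff_ne, ne_eq]
            intro hpe
            exact hnd.1 (List.mem_map.mpr ⟨p, hp, hpe⟩)
          rw [hpf]; simp
        rw [htl, List.map_id]
    · rw [if_neg hk] at h
      simp only [List.map_cons, if_neg hk]
      congr 1
      exact ih k v h hnd.2

-- inserting a key's current value back is the identity (Nodup keys)
theorem insert_getD_self (m : PySem.Dict String (List String)) (k : String)
    (hc : m.contains k = true) (hnd : m.keys.Nodup) :
    m.insert k (m.getD k []) = m := by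
  have hc' := hc
  rw [PySem.Dict.contains_eq_isSome_get?] at hc'
  obtain ⟨v, hv⟩ := Option.isSome_iff_exists.mp hc'
  have hgd : m.getD k [] = v := by rw [PySem.Dict.getD_eq_get?_getD, hv]; rfl
  apply PySem.Dict.ext
  rw [PySem.Dict.items_insert_of_contains m _ hc, hgd]
  obtain ⟨l⟩ := m
  exact map_replace_self l k v hv (by simpa [PySem.Dict.keys] using hnd)

-- A's inner value loop is one 'modify' folding the whole (already lowered) value list in
theorem inner_eq_modify (lk : String) :
    ∀ (lvs : List String) (m : PySem.Dict String (List String)),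
      m.contains lk = true → m.keys.Nodup →
      lvs.foldl (aValStep lk) m
        = m.modify lk []
            (fun l => lvs.foldl (fun out v => if out.contains v then out else out ++ [v]) l) := by
  intro lvs
  induction lvs with
  | nil =>
    intro m hc hnd
    simpa [PySem.Dict.modify] using (insert_getD_self m lk hc hnd).symm
  | cons v vs ih =>
    intro m hc hnd
    by_cases h : v ∈ m.getD lk []
    · have hstep : aValStep lk m v = m := by simp [aValStep, h]
      rw [List.foldl_cons, hstep, ih m hc hnd]
      simp [PySem.Dict.modify, h]
    · have hstep : aValStep lk m v = m.modify lk [] (· ++ [v]) := by simp [aValStep, h]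
      rw [List.foldl_cons, hstep]
      have hc' : (m.modify lk [] (· ++ [v])).contains lk = true := by
        simp [PySem.Dict.modify, PySem.Dict.contains_insert_self]
      have hnd' : (m.modify lk [] (· ++ [v])).keys.Nodup := by
        show ((m.insert lk _).keys).Nodup
        rw [PySem.Dict.keys_insert_of_contains m _ hc]
        exact hnd
      rw [ih _ hc' hnd']
      simp [PySem.Dict.modify, PySem.Dict.getD_insert_self, PySem.Dict.insert_insert_self, h]

-- bDedupValues out vs folds the lowered values of vs into out
theorem bDedupValues_eq_map (out : List String) (vs : List String) :
    bDedupValues out vs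
      = (vs.map PySem.Str.lower).foldl
          (fun out v => if out.contains v then out else out ++ [v]) out := by
  rw [List.foldl_map]
  rfl

theorem bGroupDedup_append (g : List (List String)) (vs : List String) :
    bGroupDedup (g ++ [vs]) = bDedupValues (bGroupDedup g) vs := by
  simp [bGroupDedup, List.foldl_append]

-- the combined invariant: A's fold over the remaining entries, started from the merged dict
-- reconstructed from the index, lands on the reconstruction of the final index, and A's
-- collision dict evolves exactly as B's seen-set scan
theorem main_invariant :
    ∀ (l : List (String × List String)) (ix : PySem.Dict String (List (List String)))
      (col : PySem.Dict String (List String)) (seen : PySem.Set String),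
      ix.keys.Nodup →
      (∀ s, seen.contains s = ix.contains s) →
      l.foldl aStep (mkMap ix, col)
        = (mkMap (l.foldl bIxStep ix), (l.foldl bColStep (col, seen)).1) := by
  intro l
  induction l with
  | nil => intro ix col seen _ _; rfl
  | cons kv rest ih =>
    intro ix col seen hnd hseen
    set lk := PySem.Str.lower kv.1 with hlk
    have hbix : bIxStep ix kv = ix.insert lk (ix.getD lk [] ++ [kv.2]) := rfl
    by_cases hc : ix.contains lk = true
    · -- repeated lowered key: A records a collision; the index appends to the group
      have hcmk : (mkMap ix).contains lk = true := by rw [contains_mkMap]; exact hc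
      have hstep : aStep (mkMap ix, col) kv
          = (mkMap (bIxStep ix kv), col.modify lk [] (· ++ [kv.1])) := by
        have h1 : (kv.2.map PySem.Str.lower).foldl (aValStep lk) (mkMap ix)
            = (mkMap ix).modify lk [] (fun out => bDedupValues out kv.2) := by
          rw [inner_eq_modify lk _ _ hcmk (keys_mkMap ix ▸ hnd)]
          congr 1
          funext out
          rw [bDedupValues_eq_map]
        have h2 : (mkMap ix).modify lk [] (fun out => bDedupValues out kv.2)
            = mkMap (bIxStep ix kv) := by
          apply PySem.Dict.ext
          have hgd := getD_mkMap_of_contains ix lk hc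
          simp only [PySem.Dict.modify, hbix]
          rw [hgd]
          rw [show (mkMap (ix.insert lk (ix.getD lk [] ++ [kv.2]))).items
                = (ix.insert lk (ix.getD lk [] ++ [kv.2])).items.map
                    (fun p => (p.1, bGroupDedup p.2)) from rfl]
          rw [PySem.Dict.items_insert_of_contains _ _ hcmk,
              PySem.Dict.items_insert_of_contains _ _ hc]
          show List.map _ (ix.items.map _) = List.map _ (ix.items.map _)
          rw [List.map_map, List.map_map]
          apply List.map_congr_left
          intro p hp
          by_cases hpk : (p.1 == lk) = true
          · have hpk' : p.1 = lk := by simpa using hpk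
            have hpe : (lk, p.2) = p := by rw [← hpk']
            have hgdv : ix.getD lk [] = p.2 :=
              PySem.Dict.getD_of_mem_items ix (hpe ▸ hp) hnd []
            simp [hpk', hgdv, bGroupDedup_append]
          · have hpk'' : ¬ p.1 = lk := by simpa using hpk
            simp [hpk'']
        simp only [aStep, ← hlk]
        rw [contains_mkMap]
        simp only [hc, Bool.true_eq_false, if_false]
        exact Prod.ext (h1.trans h2) rfl
      have hclk : lk ∈ seen := by
        have h := hseen lk
        rw [hc] at h
        simpa [PySem.Set.contains] using h
      have hcol : bColStep (col, seen) kv = (col.modify lk [] (· ++ [kv.1]), seen) := by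
        simp [bColStep, ← hlk, hclk]
      have hnd' : (bIxStep ix kv).keys.Nodup := by
        rw [hbix, PySem.Dict.keys_insert_of_contains _ _ hc]
        exact hnd
      have hseen' : ∀ s, seen.contains s = (bIxStep ix kv).contains s := by
        intro s
        rw [hbix, PySem.Dict.contains_insert]
        by_cases hs : s = lk
        · subst hs
          rw [hseen lk, hc]
          simp
        · have hbeq : (s == lk) = false := by simpa using hs
          rw [hbeq, Bool.false_or, hseen s]
      simp only [List.foldl_cons, hstep, hcol]
      exact ih (bIxStep ix kv) _ seen hnd' hseen'
    · -- fresh lowered key: A opens a new merged entry; the index opens a new group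
      have hcf : ix.contains lk = false := by simpa using hc
      have hcmk : (mkMap ix).contains lk = false := by rw [contains_mkMap]; exact hcf
      have hbix0 : bIxStep ix kv = ix.insert lk ([] ++ [kv.2]) := by
        rw [hbix, PySem.Dict.getD_of_not_contains _ _ hcf]
      have hstep : aStep (mkMap ix, col) kv = (mkMap (bIxStep ix kv), col) := by
        have hcins : ((mkMap ix).insert lk ([] : List String)).contains lk = true :=
          PySem.Dict.contains_insert_self _ _ _
        have hndins : ((mkMap ix).insert lk ([] : List String)).keys.Nodup := by
          rw [PySem.Dict.keys_insert_of_not_contains _ _ hcmk, keys_mkMap]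
          refine List.Nodup.append hnd (List.nodup_singleton lk) ?_
          intro a ha hb
          have hab : a = lk := by simpa using hb
          subst hab
          have hcontr : ix.contains lk = true := by
            have hex : ∃ x, (lk, x) ∈ ix.items := by simpa [PySem.Dict.keys] using ha
            obtain ⟨x, hx⟩ := hex
            simp only [PySem.Dict.contains, List.any_eq_true]
            exact ⟨(lk, x), hx, by simp⟩
          rw [hcf] at hcontr
          exact absurd hcontr Bool.false_ne_true
        have h1 : (kv.2.map PySem.Str.lower).foldl (aValStep lk) ((mkMap ix).insert lk [])
            = ((mkMap ix).insert lk []).modify lk [] (fun out => bDedupValues out kv.2) := by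
          rw [inner_eq_modify lk _ _ hcins hndins]
          congr 1
          funext out
          rw [bDedupValues_eq_map]
        have h2 : ((mkMap ix).insert lk []).modify lk [] (fun out => bDedupValues out kv.2)
            = mkMap (bIxStep ix kv) := by
          apply PySem.Dict.ext
          have hmod : ((mkMap ix).insert lk []).modify lk [] (fun out => bDedupValues out kv.2)
              = (mkMap ix).insert lk (bDedupValues [] kv.2) := by
            simp [PySem.Dict.modify, PySem.Dict.getD_insert_self, PySem.Dict.insert_insert_self]
          rw [hmod, PySem.Dict.items_insert_of_not_contains _ _ hcmk, hbix0]
          show (mkMap ix).items ++ [(lk, bDedupValues [] kv.2)]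
              = (ix.insert lk ([] ++ [kv.2])).items.map (fun p => (p.1, bGroupDedup p.2))
          rw [PySem.Dict.items_insert_of_not_contains _ _ hcf, List.map_append]
          simp [mkMap, bGroupDedup]
        simp only [aStep, ← hlk]
        rw [contains_mkMap]
        simp only [hcf, if_true]
        exact Prod.ext (h1.trans h2) rfl
      have hclk : lk ∉ seen := by
        have h := hseen lk
        rw [hcf] at h
        simpa [PySem.Set.contains] using h
      have hcol : bColStep (col, seen) kv = (col, seen.add lk) := by
        simp [bColStep, ← hlk, hclk]
      have hnd' : (bIxStep ix kv).keys.Nodup := by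
        rw [hbix0, PySem.Dict.keys_insert_of_not_contains _ _ hcf]
        refine List.Nodup.append hnd (List.nodup_singleton lk) ?_
        intro a ha hb
        have hab : a = lk := by simpa using hb
        subst hab
        have hcontr : ix.contains lk = true := by
          have hex : ∃ x, (lk, x) ∈ ix.items := by simpa [PySem.Dict.keys] using ha
          obtain ⟨x, hx⟩ := hex
          simp only [PySem.Dict.contains, List.any_eq_true]
          exact ⟨(lk, x), hx, by simp⟩
        rw [hcf] at hcontr
        exact absurd hcontr Bool.false_ne_true
      have hseen' : ∀ s, (seen.add lk).contains s = (bIxStep ix kv).contains s := by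
        intro s
        have hseen2 : ∀ t, List.contains seen t = ix.contains t := fun t => hseen t
        have hcontains_lk : seen.contains lk = false := by rw [hseen lk]; exact hcf
        have hadd : seen.add lk = seen ++ [lk] := by simp [PySem.Set.add, hclk]
        rw [hadd, hbix, PySem.Dict.contains_insert]
        show List.contains (seen ++ [lk]) s = (s == lk || ix.contains s)
        rw [List.contains_append, hseen2 s]
        by_cases hs : s = lk
        · subst hs; simp
        · simp [hs, Ne.symm hs]
      simp only [List.foldl_cons, hstep, hcol]
      exact ih (bIxStep ix kv) _ (seen.add lk) hnd' hseen'

-- ===== VERDICT (by name: the statement is the Claim_ definition above) =====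
theorem lowercase_duplicate_groups_spec : Claim_equal_lowercase_duplicate_groups := by
  intro dgs _
  show lowercase_duplicate_groups dgs = lowercase_duplicate_groups_alt dgs
  have hmain := main_invariant dgs PySem.Dict.empty PySem.Dict.empty PySem.Set.empty
    (by rw [PySem.Dict.keys_empty]; exact List.nodup_nil) (fun s => rfl)
  rw [show mkMap PySem.Dict.empty = PySem.Dict.empty from rfl] at hmain
  show ((dgs.foldl aStep (PySem.Dict.empty, PySem.Dict.empty)).1.items,
        (dgs.foldl aStep (PySem.Dict.empty, PySem.Dict.empty)).2.items)
      = (((dgs.foldl bIxStep PySem.Dict.empty).items.foldl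
            (fun (m : PySem.Dict String (List String)) p => m.insert p.1 (bGroupDedup p.2))
            PySem.Dict.empty).items,
         ((dgs.foldl bColStep (PySem.Dict.empty, PySem.Set.empty)).1).items)
  rw [hmain]
  have hnd : ((dgs.foldl bIxStep PySem.Dict.empty).items.map (·.1)).Nodup := by
    have := PySem.Dict.nodup_keys_foldl_modify_key dgs (fun kv => PySem.Str.lower kv.1)
      [] (fun _ kv => (· ++ [kv.2])) PySem.Dict.empty
      (by rw [PySem.Dict.keys_empty]; exact List.nodup_nil)
    simpa [bIxStep, PySem.Dict.keys] using this
  have hfresh := PySem.Dict.items_foldl_insert_fresh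
    ((dgs.foldl bIxStep PySem.Dict.empty).items)
    (fun p => p.1) (fun p => bGroupDedup p.2)
    (PySem.Dict.empty : PySem.Dict String (List String))
    (fun a _ => PySem.Dict.contains_empty _) hnd
  show ((mkMap (dgs.foldl bIxStep PySem.Dict.empty)).items, _) = _
  rw [hfresh]
  rfl
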